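-- pv_equiv track=rewrite | github.com/gajjalaashok75-UI/gakrai | core/llm_interface.py | _resolve_generation_messages
-- ===== SOURCE A (Python) =====
-- from typing import Any, Dict, List, Optional, Tuple
--
-- def _resolve_generation_messages(
--
--     prompt: str,
--     system_prompt: Optional[str],
--     messages: Optional[List[Dict[str, str]]],
-- ) -> Tuple[str, str]:
--     if not messages:
--         return system_prompt or "You are AutoBot, a helpful assistant.", prompt
--
--     system_msg = system_prompt or "You are AutoBot, a helpful assistant."
--     user_msg = prompt
--
--     for message in messages:
--         role = str(message.get("role", "")).strip().lower()
--         content = str(message.get("content", ""))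
--         if role == "system" and content:
--             system_msg = content
--         if role == "user" and content:
--             user_msg = content
--
--     return system_msg, user_msg
-- ===== SOURCE B (Python) =====
-- from typing import Any, Dict, List, Optional, Tuple
--
-- def _resolve_generation_messages(
--     prompt: str,
--     system_prompt: Optional[str],
--     messages: Optional[List[Dict[str, str]]],
-- ) -> Tuple[str, str]:
--     default_sys = system_prompt or "You are AutoBot, a helpful assistant."
--     if not messages:
--         return default_sys, prompt
--
--     def latest(role_name: str, fallback: str) -> str:
--         return next(
--             (c for m in reversed(messages)
--              if (c := str(m.get("content", "")))
--              and str(m.get("role", "")).strip().lower() == role_name),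
--             fallback,
--         )
--
--     return latest("system", default_sys), latest("user", prompt)
-- ===== Notes on version B (the rewrite author's own statement) =====
-- stated objective: idiomatic
-- what changed: A resolves both messages by a forward last-wins overwrite loop over all messages; B instead does two backward first-match searches (next over reversed(messages)) that stop at the first non-empty system/user content.
import Mathlib
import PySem

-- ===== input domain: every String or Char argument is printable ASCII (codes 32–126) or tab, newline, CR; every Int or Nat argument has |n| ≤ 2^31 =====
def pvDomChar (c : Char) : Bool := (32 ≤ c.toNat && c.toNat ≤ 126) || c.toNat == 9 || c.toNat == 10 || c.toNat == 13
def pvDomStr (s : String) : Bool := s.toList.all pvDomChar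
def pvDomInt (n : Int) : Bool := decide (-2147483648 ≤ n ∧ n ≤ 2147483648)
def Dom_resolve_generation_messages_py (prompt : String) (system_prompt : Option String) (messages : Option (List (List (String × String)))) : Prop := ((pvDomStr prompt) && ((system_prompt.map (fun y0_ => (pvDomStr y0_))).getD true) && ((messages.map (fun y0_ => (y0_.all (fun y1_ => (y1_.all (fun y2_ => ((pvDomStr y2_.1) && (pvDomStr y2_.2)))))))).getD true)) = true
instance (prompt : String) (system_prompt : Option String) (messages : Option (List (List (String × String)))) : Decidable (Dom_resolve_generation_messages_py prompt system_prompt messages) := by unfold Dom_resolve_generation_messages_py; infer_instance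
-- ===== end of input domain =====

-- B replaces A's forward last-wins overwrite loop by two backward first-match searches
-- (next(...) over reversed(messages)), stopping at the first hit (objective: idiomatic).

-- shared transliterations of expressions identical in both Pythons
-- message.get(k, "")  — association-list first-match lookup
def pvGetS (m : List (String × String)) (k : String) : String := (m.lookup k).getD ""
-- str(message.get("role","")).strip().lower()
def pvRoleOf (m : List (String × String)) : String := PySem.Str.lower (PySem.Str.strip (pvGetS m "role"))
-- system_prompt or "You are AutoBot, a helpful assistant."
def pvDefaultSys (system_prompt : Option String) : String :=
  match system_prompt with
  | none => "You are AutoBot, a helpful assistant."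
  | some s => if s = "" then "You are AutoBot, a helpful assistant." else s

-- ===== PORT A =====
def resolve_generation_messages_py (prompt : String) (system_prompt : Option String) (messages : Option (List (List (String × String)))) : String × String :=
  match messages with
  | none => (pvDefaultSys system_prompt, prompt)
  | some ms =>
    if ms = [] then (pvDefaultSys system_prompt, prompt)
    else
      ms.foldl (fun acc m =>
        let role := pvRoleOf m
        let content := pvGetS m "content"
        let acc1 := if role = "system" ∧ content ≠ "" then (content, acc.2) else acc
        if role = "user" ∧ content ≠ "" then (acc1.1, content) else acc1)
        (pvDefaultSys system_prompt, prompt)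

-- ===== PORT B =====
-- next((c for m in reversed(messages) if (c := str(m.get("content",""))) and
--       str(m.get("role","")).strip().lower() == role_name), fallback)
def pvLatest (l : List (List (String × String))) (role_name : String) (fallback : String) : String :=
  match l with
  | [] => fallback
  | m :: rest =>
    if pvGetS m "content" ≠ "" ∧ pvRoleOf m = role_name then pvGetS m "content"
    else pvLatest rest role_name fallback

def resolve_generation_messages_py_alt (prompt : String) (system_prompt : Option String) (messages : Option (List (List (String × String)))) : String × String :=
  let default_sys := pvDefaultSys system_prompt
  match messages with
  | none => (default_sys, prompt)
  | some ms =>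
    if ms = [] then (default_sys, prompt)
    else (pvLatest ms.reverse "system" default_sys, pvLatest ms.reverse "user" prompt)

-- ===== PRECONDITION & SPEC =====
def Spec_resolve_generation_messages_py (prompt : String) (system_prompt : Option String) (messages : Option (List (List (String × String)))) (out : String × String) : Prop := out = resolve_generation_messages_py_alt prompt system_prompt messages
instance (prompt : String) (system_prompt : Option String) (messages : Option (List (List (String × String)))) (out : String × String) : Decidable (Spec_resolve_generation_messages_py prompt system_prompt messages out) := by unfold Spec_resolve_generation_messages_py; infer_instance

-- ===== CLAIM (what is proved, stated in full; the proofs are below) =====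
def Claim_equal_resolve_generation_messages_py : Prop := ∀ (prompt : String) (system_prompt : Option String) (messages : Option (List (List (String × String)))), Dom_resolve_generation_messages_py prompt system_prompt messages → Spec_resolve_generation_messages_py prompt system_prompt messages (resolve_generation_messages_py prompt system_prompt messages)

-- ===== LEMMAS AND PROOFS =====

def pvSysStep (s : String) (m : List (String × String)) : String :=
  if pvRoleOf m = "system" ∧ pvGetS m "content" ≠ "" then pvGetS m "content" else s

def pvUserStep (u : String) (m : List (String × String)) : String :=
  if pvRoleOf m = "user" ∧ pvGetS m "content" ≠ "" then pvGetS m "content" else u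

theorem pvSysStep_pos (m : List (String × String)) (X : String)
    (h1 : pvRoleOf m = "system") (h2 : pvGetS m "content" ≠ "") :
    pvSysStep X m = pvGetS m "content" := by
  unfold pvSysStep; rw [if_pos ⟨h1, h2⟩]

theorem pvSysStep_neg (m : List (String × String)) (X : String)
    (h : ¬ (pvRoleOf m = "system" ∧ pvGetS m "content" ≠ "")) :
    pvSysStep X m = X := by
  unfold pvSysStep; rw [if_neg h]

theorem pvUserStep_pos (m : List (String × String)) (Y : String)
    (h1 : pvRoleOf m = "user") (h2 : pvGetS m "content" ≠ "") :
    pvUserStep Y m = pvGetS m "content" := by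
  unfold pvUserStep; rw [if_pos ⟨h1, h2⟩]

theorem pvUserStep_neg (m : List (String × String)) (Y : String)
    (h : ¬ (pvRoleOf m = "user" ∧ pvGetS m "content" ≠ "")) :
    pvUserStep Y m = Y := by
  unfold pvUserStep; rw [if_neg h]

-- one step of A's coupled fold updates the two components independently
theorem pvStep_eq (acc : String × String) (m : List (String × String)) :
    (let role := pvRoleOf m
     let content := pvGetS m "content"
     let acc1 := if role = "system" ∧ content ≠ "" then (content, acc.2) else acc
     if role = "user" ∧ content ≠ "" then (acc1.1, content) else acc1)
    = (pvSysStep acc.1 m, pvUserStep acc.2 m) := by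
  simp only [pvSysStep, pvUserStep]
  split_ifs <;> rfl

-- hence A's coupled fold splits into two independent folds
theorem pvFold_split (l : List (List (String × String))) (acc : String × String) :
    l.foldl (fun acc m =>
        let role := pvRoleOf m
        let content := pvGetS m "content"
        let acc1 := if role = "system" ∧ content ≠ "" then (content, acc.2) else acc
        if role = "user" ∧ content ≠ "" then (acc1.1, content) else acc1) acc
    = (l.foldl pvSysStep acc.1, l.foldl pvUserStep acc.2) := by
  induction l generalizing acc with
  | nil => rfl
  | cons m rest ih =>
    rw [List.foldl_cons, List.foldl_cons, List.foldl_cons, pvStep_eq, ih]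

-- B's backward first-match search computes the last-wins value of A's forward fold
theorem pvLatest_sys (l : List (List (String × String))) (fb : String) :
    pvLatest l "system" fb = l.reverse.foldl pvSysStep fb := by
  induction l generalizing fb with
  | nil => rfl
  | cons m rest ih =>
    rw [List.reverse_cons, List.foldl_append, List.foldl_cons, List.foldl_nil]
    have e : pvLatest (m :: rest) "system" fb =
        (if pvGetS m "content" ≠ "" ∧ pvRoleOf m = "system" then pvGetS m "content"
         else pvLatest rest "system" fb) := rfl
    rw [e]
    by_cases h : pvGetS m "content" ≠ "" ∧ pvRoleOf m = "system"
    · rw [if_pos h, pvSysStep_pos m _ h.2 h.1]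
    · rw [if_neg h, ih, pvSysStep_neg m _ (fun hc => h ⟨hc.2, hc.1⟩)]

theorem pvLatest_user (l : List (List (String × String))) (fb : String) :
    pvLatest l "user" fb = l.reverse.foldl pvUserStep fb := by
  induction l generalizing fb with
  | nil => rfl
  | cons m rest ih =>
    rw [List.reverse_cons, List.foldl_append, List.foldl_cons, List.foldl_nil]
    have e : pvLatest (m :: rest) "user" fb =
        (if pvGetS m "content" ≠ "" ∧ pvRoleOf m = "user" then pvGetS m "content"
         else pvLatest rest "user" fb) := rfl
    rw [e]
    by_cases h : pvGetS m "content" ≠ "" ∧ pvRoleOf m = "user"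
    · rw [if_pos h, pvUserStep_pos m _ h.2 h.1]
    · rw [if_neg h, ih, pvUserStep_neg m _ (fun hc => h ⟨hc.2, hc.1⟩)]

-- ===== VERDICT (by name: the statement is the Claim_ definition above) =====
theorem resolve_generation_messages_py_spec : Claim_equal_resolve_generation_messages_py := by
  intro prompt system_prompt messages _
  unfold Spec_resolve_generation_messages_py resolve_generation_messages_py resolve_generation_messages_py_alt
  cases messages with
  | none => rfl
  | some ms =>
    by_cases h : ms = []
    · simp [h]
    · simp only [h, if_false]
      rw [pvFold_split, pvLatest_sys, pvLatest_user, List.reverse_reverse]
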